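-- pv_equiv track=rewrite | github.com/FPGA-Networking/HyperParser | software_code/parse_graph_to_selected_bits/code_LiuHuan/code/bit_selection.py | iter_6
-- ===== SOURCE A (Python) =====
-- def iter_6(num):
--     for a1 in range(num):
--         for a2 in range(a1+1,num):
--             for a3 in range(a2+1,num):
--                 for a4 in range(a3+1,num):
--                     for a5 in range(a4+1,num):
--                         for a6 in range(a5+1,num):
--                             yield [num-a1,num-a2,num-a3,num-a4,num-a5,num-a6]
-- ===== SOURCE B (Python) =====
-- def iter_6(num):
--     def rec(start, chosen):
--         if len(chosen) == 6:
--             yield [num - x for x in chosen]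
--         else:
--             for i in range(start, num):
--                 yield from rec(i + 1, chosen + [i])
--     yield from rec(0, [])
-- ===== Notes on version B (the rewrite author's own statement) =====
-- stated objective: simpler
-- what changed: Replaces the six hardcoded nested for-loops with a single recursive generator over the remaining depth, carrying the chosen indices as an accumulator.
import Mathlib
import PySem

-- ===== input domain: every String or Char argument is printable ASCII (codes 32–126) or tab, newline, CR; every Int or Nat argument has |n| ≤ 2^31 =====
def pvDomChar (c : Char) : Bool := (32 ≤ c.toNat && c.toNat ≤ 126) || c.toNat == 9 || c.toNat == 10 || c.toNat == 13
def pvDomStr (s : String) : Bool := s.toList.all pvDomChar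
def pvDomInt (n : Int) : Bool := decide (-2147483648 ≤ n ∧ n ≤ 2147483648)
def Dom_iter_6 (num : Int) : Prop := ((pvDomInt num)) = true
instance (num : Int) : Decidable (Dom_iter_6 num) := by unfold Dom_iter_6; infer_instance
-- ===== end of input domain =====

-- B replaces A's six hardcoded nested loops by a single fixed-depth recursion carrying the chosen indices (same output, same order; objective: simpler decomposition).
-- ===== PORT A =====
def iter_6 (num : Int) : List (List Int) :=
  (PySem.List.pyRange 0 num 1).flatMap (fun a1 =>
    (PySem.List.pyRange (a1+1) num 1).flatMap (fun a2 =>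
      (PySem.List.pyRange (a2+1) num 1).flatMap (fun a3 =>
        (PySem.List.pyRange (a3+1) num 1).flatMap (fun a4 =>
          (PySem.List.pyRange (a4+1) num 1).flatMap (fun a5 =>
            (PySem.List.pyRange (a5+1) num 1).map (fun a6 =>
              [num-a1,num-a2,num-a3,num-a4,num-a5,num-a6]))))))

-- ===== PORT B =====
-- recursive helper: depth counter k = 6 - len(chosen)
def iter6Rec (num : Int) (start : Int) (chosen : List Int) : Nat → List (List Int)
  | 0 => [chosen.map (fun x => num - x)]
  | Nat.succ k =>
      (PySem.List.pyRange start num 1).flatMap (fun i =>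
        iter6Rec num (i+1) (chosen ++ [i]) k)

def iter_6_alt (num : Int) : List (List Int) := iter6Rec num 0 [] 6

-- ===== PRECONDITION & SPEC =====
def Spec_iter_6 (num : Int) (out : List (List Int)) : Prop := out = iter_6_alt num
instance (num : Int) (out : List (List Int)) : Decidable (Spec_iter_6 num out) := by unfold Spec_iter_6; infer_instance

-- ===== CLAIM (what is proved, stated in full; the proofs are below) =====
def Claim_equal_iter_6 : Prop := ∀ (num : Int), Dom_iter_6 num → Spec_iter_6 num (iter_6 num)

-- ===== LEMMAS AND PROOFS =====

-- ===== VERDICT (by name: the statement is the Claim_ definition above) =====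
theorem iter_6_spec : Claim_equal_iter_6 := by
  intro num _
  unfold Spec_iter_6 iter_6 iter_6_alt
  simp only [iter6Rec, List.nil_append, List.cons_append, List.map_cons, List.map_nil]
  simp only [List.map_eq_flatMap]
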